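-- pv_equiv track=rewrite | github.com/ITYushangChen/Uni_Projects | DATA3888_BrainBox/program/stream.py | get_last_window
-- ===== SOURCE A (Python) =====
-- def get_last_window(time_array, data_array, window):
--     start_index= 0
--     data_last_window = data_array
--     time_last_window = time_array
--     for i in range(len(time_array)-1, 0, -1):
--         if (time_array[-1] - time_array[i]) > window:
--             start_index = i
--             break
--     data_last_window = data_last_window[start_index:]
--     time_last_window = time_last_window[start_index:]
--     return data_last_window, time_last_window
-- ===== SOURCE B (Python) =====
-- def get_last_window(time_array, data_array, window):
--     # Forward single pass keeping the last matching index (equals A's first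
--     # match scanning backward with break); then slice both arrays.
--     start_index = 0
--     n = len(time_array)
--     if n:
--         last = time_array[-1]
--         for i in range(1, n):
--             if last - time_array[i] > window:
--                 start_index = i
--     return data_array[start_index:], time_array[start_index:]
-- ===== Notes on version B (the rewrite author's own statement) =====
-- stated objective: alternative
-- what changed: Replaces A's backward scan with early break (first index from the end where time[-1]-time[i] > window) by a single forward pass that keeps the last matching index, with a proof that the two traversal orders pick the same index.
import Mathlib
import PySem

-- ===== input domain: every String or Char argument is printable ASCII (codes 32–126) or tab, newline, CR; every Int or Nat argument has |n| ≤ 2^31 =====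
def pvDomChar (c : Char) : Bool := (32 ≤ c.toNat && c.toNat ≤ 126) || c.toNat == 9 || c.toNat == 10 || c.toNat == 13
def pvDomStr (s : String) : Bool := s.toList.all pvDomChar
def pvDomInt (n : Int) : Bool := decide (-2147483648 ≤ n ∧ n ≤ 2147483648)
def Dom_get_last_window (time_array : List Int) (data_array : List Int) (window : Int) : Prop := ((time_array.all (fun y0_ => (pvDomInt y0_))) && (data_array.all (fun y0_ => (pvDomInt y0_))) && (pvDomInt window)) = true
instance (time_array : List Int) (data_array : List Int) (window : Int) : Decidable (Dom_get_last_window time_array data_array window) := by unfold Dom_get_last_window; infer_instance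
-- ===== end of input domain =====

-- B replaces A's backward scan with an early break by a forward pass keeping
-- the last matching index (alternative decomposition, same O(n) cost).

-- ===== PORT A =====
-- backward loop 'for i in range(len(time_array)-1, 0, -1): if …: start_index = i; break'
-- (pyGetD is exact here: every index the loop reads is in range)
def pvGoA (time_array : List Int) (window : Int) : List Int → Int
  | [] => 0
  | i :: rest =>
      if PySem.List.pyGetD time_array (-1) 0 - PySem.List.pyGetD time_array i 0 > window
      then i else pvGoA time_array window rest

def get_last_window (time_array : List Int) (data_array : List Int) (window : Int) : List Int × List Int :=
  let start_index := pvGoA time_array window (PySem.List.pyRange ((time_array.length : Int) - 1) 0 (-1))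
  (PySem.List.slice data_array (some start_index) none,
   PySem.List.slice time_array (some start_index) none)

-- ===== PORT B =====
-- forward loop 'for i in range(1, n): if last - time_array[i] > window: start_index = i'
def get_last_window_alt (time_array : List Int) (data_array : List Int) (window : Int) : List Int × List Int :=
  let start_index :=
    if time_array.length ≠ 0 then
      let last := PySem.List.pyGetD time_array (-1) 0
      (PySem.List.pyRange 1 (time_array.length : Int) 1).foldl
        (fun acc i => if last - PySem.List.pyGetD time_array i 0 > window then i else acc) 0
    else 0
  (PySem.List.slice data_array (some start_index) none,
   PySem.List.slice time_array (some start_index) none)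

-- ===== PRECONDITION & SPEC =====
def Spec_get_last_window (time_array : List Int) (data_array : List Int) (window : Int) (out : List Int × List Int) : Prop := out = get_last_window_alt time_array data_array window
instance (time_array : List Int) (data_array : List Int) (window : Int) (out : List Int × List Int) : Decidable (Spec_get_last_window time_array data_array window out) := by unfold Spec_get_last_window; infer_instance

-- ===== CLAIM (what is proved, stated in full; the proofs are below) =====
def Claim_equal_get_last_window : Prop := ∀ (time_array : List Int) (data_array : List Int) (window : Int), Dom_get_last_window time_array data_array window → Spec_get_last_window time_array data_array window (get_last_window time_array data_array window)

-- ===== LEMMAS AND PROOFS =====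

-- first match scanning a list = last match of the reversed list (fold keeping the last hit)
theorem pvGoA_eq_foldl_reverse (t : List Int) (w : Int) (l : List Int) :
    pvGoA t w l =
      l.reverse.foldl
        (fun acc i => if PySem.List.pyGetD t (-1) 0 - PySem.List.pyGetD t i 0 > w then i else acc) 0 := by
  induction l with
  | nil => rfl
  | cons i rest ih =>
      simp [pvGoA, List.foldl_append, ih]

theorem get_last_window_spec' (time_array data_array : List Int) (window : Int) :
    get_last_window time_array data_array window = get_last_window_alt time_array data_array window := by
  unfold get_last_window get_last_window_alt
  by_cases h : time_array.length = 0
  · simp [h, PySem.List.pyRange_neg_one_eq_nil, pvGoA]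
  · have hrev : PySem.List.pyRange ((time_array.length : Int) - 1) 0 (-1)
        = (PySem.List.pyRange 1 (time_array.length : Int) 1).reverse := by
      rw [PySem.List.pyRange_neg_one_eq_reverse]
      norm_num
    rw [hrev, pvGoA_eq_foldl_reverse, List.reverse_reverse]
    simp [h]

-- ===== VERDICT (by name: the statement is the Claim_ definition above) =====
theorem get_last_window_spec : Claim_equal_get_last_window := by
  intro t d w _
  exact get_last_window_spec' t d w
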